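-- pv_equiv track=rewrite | github.com/arvindpandey4/terminal_project | utils/history_manager.py | format_history_markdown
-- ===== SOURCE A (Python) =====
-- def format_history_markdown(history_data):
--     """
--     Format history data as Markdown.
--
--     Args:
--         history_data (list): The history data to format
--
--     Returns:
--         str: Formatted history as Markdown
--     """
--     lines = ["# Terminal Command History", ""]
--
--     current_date = None
--
--     for entry in history_data:
--         timestamp = entry.get('timestamp', 'Unknown time')
--         tab_id = entry.get('tab_id', 'default')
--         command = entry.get('command', '')
--         output = entry.get('output', '')
--
--         # Extract date from timestamp
--         date = timestamp.split(' ')[0] if ' ' in timestamp else timestamp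
--
--         # Add date header if it's a new date
--         if date != current_date:
--             current_date = date
--             lines.append(f"## {date}")
--             lines.append("")
--
--         # Add command with timestamp and tab
--         lines.append(f"### {timestamp} (Tab: {tab_id})")
--         lines.append("")
--         lines.append("```bash")
--         lines.append(f"$ {command}")
--         lines.append("```")
--         lines.append("")
--
--         # Add output if available
--         if output:
--             lines.append("**Output:**")
--             lines.append("")
--             lines.append("```")
--             lines.append(output)
--             lines.append("```")
--             lines.append("")
--
--     return '\n'.join(lines)
-- ===== SOURCE B (Python) =====
-- def format_history_markdown(history_data):
--     """Format history data as Markdown (grouped by consecutive runs of equal date)."""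
--     def date_of(entry):
--         ts = entry.get('timestamp', 'Unknown time')
--         return ts.split(' ')[0] if ' ' in ts else ts
--
--     def block(entry):
--         ts = entry.get('timestamp', 'Unknown time')
--         lines = [f"### {ts} (Tab: {entry.get('tab_id', 'default')})", "",
--                  "```bash", f"$ {entry.get('command', '')}", "```", ""]
--         output = entry.get('output', '')
--         if output:
--             lines += ["**Output:**", "", "```", output, "```", ""]
--         return lines
--
--     lines = ["# Terminal Command History", ""]
--     i, n = 0, len(history_data)
--     while i < n:
--         date = date_of(history_data[i])
--         j = i + 1
--         while j < n and date_of(history_data[j]) == date: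
--             j += 1
--         lines += [f"## {date}", ""]
--         for entry in history_data[i:j]:
--             lines += block(entry)
--         i = j
--     return '\n'.join(lines)
-- ===== Notes on version B (the rewrite author's own statement) =====
-- stated objective: alternative
-- what changed: B first splits the history into consecutive runs of equal date (a span/scan over each run) and renders each group as a header plus its blocks, instead of A's single stateful pass that tracks a current_date variable.
import Mathlib
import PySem

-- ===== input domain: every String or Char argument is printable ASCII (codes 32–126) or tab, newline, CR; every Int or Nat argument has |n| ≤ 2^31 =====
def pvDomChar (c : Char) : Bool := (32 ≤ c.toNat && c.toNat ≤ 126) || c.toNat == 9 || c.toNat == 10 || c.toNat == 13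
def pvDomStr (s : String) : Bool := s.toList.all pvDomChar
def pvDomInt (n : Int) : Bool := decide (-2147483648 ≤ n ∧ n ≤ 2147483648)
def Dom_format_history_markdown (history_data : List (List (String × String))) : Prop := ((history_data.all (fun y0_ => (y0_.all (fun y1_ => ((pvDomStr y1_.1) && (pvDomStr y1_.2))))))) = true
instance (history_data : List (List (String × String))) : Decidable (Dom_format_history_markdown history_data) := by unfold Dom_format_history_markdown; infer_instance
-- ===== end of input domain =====

-- B renders the history as consecutive runs of equal date instead of A's single stateful
-- current_date pass; same output, alternative structure.

-- ===== PORT A =====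
-- the body of A's for-loop (carried state: (lines, current_date))
def pvStepA (st : List String × Option String) (entry : List (String × String)) :
    List String × Option String :=
  let lines := st.1
  let current_date := st.2
  let timestamp := PySem.Dict.getD (PySem.Dict.mk entry) "timestamp" "Unknown time"
  let tab_id := PySem.Dict.getD (PySem.Dict.mk entry) "tab_id" "default"
  let command := PySem.Dict.getD (PySem.Dict.mk entry) "command" ""
  let output := PySem.Dict.getD (PySem.Dict.mk entry) "output" ""
  let date := if PySem.Str.isIn " " timestamp then
      PySem.List.pyGetD ((PySem.Str.split? timestamp " ").getD []) 0 "" else timestamp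
  let st1 : List String × Option String :=
    if some date ≠ current_date then (lines ++ ["## " ++ date, ""], some date)
    else (lines, current_date)
  let lines := st1.1 ++ ["### " ++ timestamp ++ " (Tab: " ++ tab_id ++ ")", "",
    "```bash", "$ " ++ command, "```", ""]
  let lines := if output ≠ "" then
      lines ++ ["**Output:**", "", "```", output, "```", ""] else lines
  (lines, st1.2)

def format_history_markdown (history_data : List (List (String × String))) : String :=
  PySem.Str.join "\n"
    (history_data.foldl pvStepA (["# Terminal Command History", ""], none)).1

-- ===== PORT B =====
-- B-side helpers: date_of and block from Source B
def pvDateOf (entry : List (String × String)) : String :=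
  let ts := PySem.Dict.getD (PySem.Dict.mk entry) "timestamp" "Unknown time"
  if PySem.Str.isIn " " ts then PySem.List.pyGetD ((PySem.Str.split? ts " ").getD []) 0 "" else ts

def pvBlock (entry : List (String × String)) : List String :=
  let ts := PySem.Dict.getD (PySem.Dict.mk entry) "timestamp" "Unknown time"
  let tab := PySem.Dict.getD (PySem.Dict.mk entry) "tab_id" "default"
  let cmd := PySem.Dict.getD (PySem.Dict.mk entry) "command" ""
  let output := PySem.Dict.getD (PySem.Dict.mk entry) "output" ""
  let lines := ["### " ++ ts ++ " (Tab: " ++ tab ++ ")", "", "```bash", "$ " ++ cmd, "```", ""]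
  if output ≠ "" then lines ++ ["**Output:**", "", "```", output, "```", ""] else lines

-- the outer while loop of Source B: peel one run of equal date (the inner j-scan), render it, continue
def pvRender : List (List (String × String)) → List String
  | [] => []
  | e :: rest =>
    let d := pvDateOf e
    let run := rest.takeWhile (fun e' => pvDateOf e' == d)
    let rest' := rest.dropWhile (fun e' => pvDateOf e' == d)
    ["## " ++ d, ""] ++ (e :: run).flatMap pvBlock ++ pvRender rest'
termination_by es => es.length
decreasing_by
  have := List.length_dropWhile_le (p := fun e' => pvDateOf e' == pvDateOf e) (l := rest)
  simp
  omega

def format_history_markdown_alt (history_data : List (List (String × String))) : String :=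
  PySem.Str.join "\n" (["# Terminal Command History", ""] ++ pvRender history_data)

-- ===== PRECONDITION & SPEC =====
def Spec_format_history_markdown (history_data : List (List (String × String))) (out : String) : Prop := out = format_history_markdown_alt history_data
instance (history_data : List (List (String × String))) (out : String) : Decidable (Spec_format_history_markdown history_data out) := by unfold Spec_format_history_markdown; infer_instance

-- ===== CLAIM (what is proved, stated in full; the proofs are below) =====
def Claim_equal_format_history_markdown : Prop := ∀ (history_data : List (List (String × String))), Dom_format_history_markdown history_data → Spec_format_history_markdown history_data (format_history_markdown history_data)

-- ===== LEMMAS AND PROOFS =====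

-- what A's loop produces after the fixed prefix, as a function of the current_date state
def pvTail (cur : Option String) : List (List (String × String)) → List String
  | [] => []
  | e :: rest =>
    (if some (pvDateOf e) ≠ cur then ["## " ++ pvDateOf e, ""] else []) ++ pvBlock e ++
      pvTail (some (pvDateOf e)) rest

lemma pvStepA_eq (st : List String × Option String) (e : List (String × String)) :
    pvStepA st e =
      (st.1 ++ ((if some (pvDateOf e) ≠ st.2 then ["## " ++ pvDateOf e, ""] else []) ++ pvBlock e),
       some (pvDateOf e)) := by
  obtain ⟨acc, cur⟩ := st
  simp only [pvStepA]
  rw [show (if PySem.Str.isIn " " (PySem.Dict.getD (PySem.Dict.mk e) "timestamp" "Unknown time") = true then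
        PySem.List.pyGetD ((PySem.Str.split? (PySem.Dict.getD (PySem.Dict.mk e) "timestamp" "Unknown time") " ").getD []) 0 ""
      else PySem.Dict.getD (PySem.Dict.mk e) "timestamp" "Unknown time") = pvDateOf e from rfl]
  by_cases h1 : some (pvDateOf e) ≠ cur
  · by_cases h2 : PySem.Dict.getD (PySem.Dict.mk e) "output" "" ≠ "" <;>
      simp [pvBlock, h1, h2, List.append_assoc]
  · push Not at h1
    by_cases h2 : PySem.Dict.getD (PySem.Dict.mk e) "output" "" ≠ "" <;>
      simp [pvBlock, ← h1, h2, List.append_assoc]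

lemma pv_foldA (es : List (List (String × String))) :
    ∀ (acc : List String) (cur : Option String),
    (es.foldl pvStepA (acc, cur)).1 = acc ++ pvTail cur es := by
  induction es with
  | nil => intro acc cur; simp [pvTail]
  | cons e rest ih =>
    intro acc cur
    rw [List.foldl_cons, pvStepA_eq, ih]
    simp [pvTail, List.append_assoc]

lemma pv_tail_some (es : List (List (String × String))) :
    ∀ d, pvTail (some d) es =
      (es.takeWhile (fun e => pvDateOf e == d)).flatMap pvBlock ++
        pvRender (es.dropWhile (fun e => pvDateOf e == d)) := by
  induction es with
  | nil => intro d; simp [pvTail, pvRender]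
  | cons e rest ih =>
    intro d
    by_cases h : pvDateOf e = d
    · rw [pvTail]
      simp only [h, List.takeWhile_cons, List.dropWhile_cons, beq_self_eq_true, if_true, ite_not]
      simp [ih d]
    · have hb : (pvDateOf e == d) = false := by simp [h]
      rw [pvTail]
      simp only [List.takeWhile_cons, List.dropWhile_cons, hb]
      rw [pvRender.eq_def]
      simp [h, ih (pvDateOf e), List.append_assoc]

lemma pv_tail_none (es : List (List (String × String))) : pvTail none es = pvRender es := by
  cases es with
  | nil => simp [pvTail, pvRender]
  | cons e rest =>
    rw [pvTail, pvRender.eq_def, pv_tail_some]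
    simp [List.append_assoc]

-- ===== VERDICT (by name: the statement is the Claim_ definition above) =====
theorem format_history_markdown_spec : Claim_equal_format_history_markdown := by
  intro h _
  unfold Spec_format_history_markdown format_history_markdown format_history_markdown_alt
  rw [pv_foldA, pv_tail_none]
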